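-- pv_equiv track=rewrite | github.com/easystreet31/ultimate-quest-service | main.py | _split_players
-- ===== SOURCE A (Python) =====
-- from typing import Dict, Any, List, Optional, Tuple, Union
--
-- def _split_players(players_str: str) -> List[str]:
--     if not isinstance(players_str, str):
--         return []
--     s = players_str.strip()
--     if not s:
--         return []
--     for pat in [" and ", ",", "&", "/", "+", ";", "|", "•"]:
--         s = s.replace(pat, ",")
--     parts = [p.strip() for p in s.split(",") if p.strip()]
--     seen = set(); out = []
--     for p in parts:
--         pl = p.lower()
--         if pl not in seen:
--             out.append(p)
--             seen.add(pl)
--     return out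
-- ===== SOURCE B (Python) =====
-- def _split_players(players_str):
--     if not isinstance(players_str, str):
--         return []
--     s = players_str.strip()
--     if not s:
--         return []
--     delims = set(",&/+;|\u2022")
--     tokens = []
--     cur = []
--     i = 0
--     n = len(s)
--     while i < n:
--         if s.startswith(" and ", i):
--             tokens.append("".join(cur)); cur = []; i += 5
--         elif s[i] in delims:
--             tokens.append("".join(cur)); cur = []; i += 1
--         else:
--             cur.append(s[i]); i += 1
--     tokens.append("".join(cur))
--     seen = set()
--     out = []
--     for tok in tokens:
--         t = tok.strip()
--         if t and t.lower() not in seen: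
--             seen.add(t.lower())
--             out.append(t)
--     return out
-- ===== Notes on version B (the rewrite author's own statement) =====
-- stated objective: alternative
-- what changed: B replaces A's normalise-then-split pipeline (eight sequential str.replace passes over the whole string followed by a comma split) with a single left-to-right tokenizer scan that cuts a token at the multi-character connector or at any single delimiter character, and fuses the strip/non-empty filter into the dedup loop.
import Mathlib
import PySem

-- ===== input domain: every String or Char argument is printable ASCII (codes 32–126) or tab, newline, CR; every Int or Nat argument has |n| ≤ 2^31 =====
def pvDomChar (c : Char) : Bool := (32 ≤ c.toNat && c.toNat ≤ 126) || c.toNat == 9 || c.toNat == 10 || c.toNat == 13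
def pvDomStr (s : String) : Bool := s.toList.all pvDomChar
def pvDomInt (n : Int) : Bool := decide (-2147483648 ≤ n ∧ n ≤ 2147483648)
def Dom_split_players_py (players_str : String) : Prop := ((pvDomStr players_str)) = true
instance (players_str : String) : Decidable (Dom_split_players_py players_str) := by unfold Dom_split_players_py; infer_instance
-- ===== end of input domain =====

-- B replaces A's sequential replace-every-delimiter-then-split normalisation by a single
-- left-to-right tokenizer scan (one pass, no intermediate normalised string); same return value.

-- ===== PORT A =====
-- dedup loop of A: for p in parts: if p.lower() not in seen: out.append(p); seen.add(p.lower())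
def pvDedupA : List (List Char) → PySem.Set (List Char) → List (List Char) → List (List Char)
  | [], _, out => out
  | p :: rest, seen, out =>
    let pl := PySem.Chars.lower p
    if PySem.Set.contains seen pl then pvDedupA rest seen out
    else pvDedupA rest (PySem.Set.add seen pl) (out ++ [p])

def split_players_py (players_str : String) : List String :=
  let s0 := PySem.Chars.strip players_str.toList
  if s0 = [] then []
  else
    let s := [" and ", ",", "&", "/", "+", ";", "|", "•"].foldl
      (fun acc pat => PySem.Chars.replace acc pat.toList [',']) s0
    let parts := ((PySem.Chars.splitOn s [',']).filter
      (fun p => !(PySem.Chars.strip p).isEmpty)).map PySem.Chars.strip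
    (pvDedupA parts PySem.Set.empty []).map String.ofList

-- ===== PORT B =====
def pvIsAnd (l : List Char) : Bool := (" and ".toList).isPrefixOf l

def pvDelims : List Char := [',', '&', '/', '+', ';', '|', '•']

-- B's while loop: scan left to right, cutting a token at " and " or at a single delimiter char
def pvTokens : List Char → List (List Char)
  | [] => [[]]
  | c :: t =>
    if pvIsAnd (c :: t) then [] :: pvTokens (t.drop 4)
    else if c ∈ pvDelims then [] :: pvTokens t
    else match pvTokens t with
      | [] => [[c]]
      | x :: xs => (c :: x) :: xs
termination_by l => l.length
decreasing_by
  all_goals simp only [List.length_drop, List.length_cons]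
  all_goals omega

-- B's dedup loop: strip, drop empties and case-insensitive duplicates in one pass
def pvDedupB : List (List Char) → PySem.Set (List Char) → List (List Char) → List (List Char)
  | [], _, out => out
  | tok :: rest, seen, out =>
    let t := PySem.Chars.strip tok
    if t ≠ [] ∧ ¬ PySem.Set.contains seen (PySem.Chars.lower t) then
      pvDedupB rest (PySem.Set.add seen (PySem.Chars.lower t)) (out ++ [t])
    else pvDedupB rest seen out

def split_players_py_alt (players_str : String) : List String :=
  let s := PySem.Chars.strip players_str.toList
  if s = [] then []
  else (pvDedupB (pvTokens s) PySem.Set.empty []).map String.ofList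

-- ===== PRECONDITION & SPEC =====
def Spec_split_players_py (players_str : String) (out : List String) : Prop := out = split_players_py_alt players_str
instance (players_str : String) (out : List String) : Decidable (Spec_split_players_py players_str out) := by unfold Spec_split_players_py; infer_instance

-- ===== CLAIM (what is proved, stated in full; the proofs are below) =====
def Claim_equal_split_players_py : Prop := ∀ (players_str : String), Dom_split_players_py players_str → Spec_split_players_py players_str (split_players_py players_str)

-- ===== LEMMAS AND PROOFS =====

-- structural form of A's replace(" and ", ",")
def pvReplAnd : List Char → List Char
  | [] => []
  | c :: t =>
    if pvIsAnd (c :: t) then ',' :: pvReplAnd (t.drop 4)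
    else c :: pvReplAnd t
termination_by l => l.length
decreasing_by
  all_goals simp only [List.length_drop, List.length_cons]
  all_goals omega

-- structural form of A's split(",")
def pvSplitC : List Char → List (List Char)
  | [] => [[]]
  | c :: t => if c = ',' then [] :: pvSplitC t else (pvSplitC t).modifyHead (c :: ·)

-- the combined effect of A's six single-character replaces
def pvF (c : Char) : Char := if c ∈ pvDelims then ',' else c

theorem pvGoAnd (fuel : Nat) : ∀ (l acc : List Char), l.length ≤ fuel →
    PySem.Chars.replace.go (" and ".toList) [','] fuel l acc = acc.reverse ++ pvReplAnd l := by
  induction fuel with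
  | zero =>
    intro l acc h
    have : l = [] := by cases l <;> simp_all
    subst this; simp [PySem.Chars.replace.go, pvReplAnd]
  | succ n ih =>
    intro l acc h
    cases l with
    | nil => simp [PySem.Chars.replace.go, pvReplAnd]
    | cons c t =>
      rw [PySem.Chars.replace.go, pvReplAnd]
      by_cases hp : (" and ".toList).isPrefixOf (c :: t)
      all_goals simp only [pvIsAnd]
      · have hlen : (t.drop 4).length ≤ n := by
          simp only [List.length_drop]
          simp only [List.length_cons] at h
          omega
        simp only [hp, if_true]
        have : (" and ".toList).length = 5 := by decide
        rw [this]
        show PySem.Chars.replace.go _ _ n (t.drop 4) _ = _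
        rw [ih _ _ hlen]
        simp
      · simp only [hp, if_false]
        rw [ih t (c :: acc) (by simp at h; omega)]
        simp

theorem pvReplaceAnd (s : List Char) :
    PySem.Chars.replace s (" and ".toList) [','] = pvReplAnd s := by
  rw [PySem.Chars.replace]
  simp only [List.isEmpty_iff]
  rw [if_neg (by decide)]
  rw [pvGoAnd s.length s [] (le_refl _)]
  simp

theorem pvGoChar (a : Char) (fuel : Nat) : ∀ (l acc : List Char), l.length ≤ fuel →
    PySem.Chars.replace.go [a] [','] fuel l acc
      = acc.reverse ++ l.map (fun c => if c = a then ',' else c) := by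
  induction fuel with
  | zero =>
    intro l acc h
    have : l = [] := by cases l <;> simp_all
    subst this; simp [PySem.Chars.replace.go]
  | succ n ih =>
    intro l acc h
    cases l with
    | nil => simp [PySem.Chars.replace.go]
    | cons c t =>
      rw [PySem.Chars.replace.go]
      simp only [List.length_cons] at h
      by_cases hp : ([a]).isPrefixOf (c :: t)
      · have hac : c = a := by simp [List.isPrefixOf] at hp; exact hp.symm
        simp only [hp, if_true, List.length_cons, List.length_nil]
        show PySem.Chars.replace.go _ _ n ((c :: t).drop 1) _ = _
        simp only [List.drop_one, List.tail_cons]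
        rw [ih t _ (by omega)]
        simp [hac]
      · have hac : ¬ c = a := by simp [List.isPrefixOf] at hp; simpa [eq_comm] using hp
        simp only [hp, if_false]
        rw [ih t (c :: acc) (by omega)]
        simp [hac]

theorem pvReplaceChar (a : Char) (s : List Char) :
    PySem.Chars.replace s [a] [','] = s.map (fun c => if c = a then ',' else c) := by
  rw [PySem.Chars.replace]
  rw [if_neg (by simp)]
  rw [pvGoChar a s.length s [] (le_refl _)]
  simp

theorem pvMapComma (l : List Char) :
    l.map (fun c => if c = ',' then ',' else c) = l := by
  have : (fun c : Char => if c = ',' then ',' else c) = id := by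
    funext c; by_cases h : c = ',' <;> simp [h]
  simp [this]

theorem pvGoSplit (fuel : Nat) : ∀ (l cur : List Char) (acc : List (List Char)),
    l.length ≤ fuel →
    PySem.Chars.splitOn.go [','] fuel l cur acc
      = acc.reverse ++ (pvSplitC l).modifyHead (cur.reverse ++ ·) := by
  induction fuel with
  | zero =>
    intro l cur acc h
    have : l = [] := by cases l <;> simp_all
    subst this; simp [PySem.Chars.splitOn.go, pvSplitC]
  | succ n ih =>
    intro l cur acc h
    cases l with
    | nil => simp [PySem.Chars.splitOn.go, pvSplitC]
    | cons c t =>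
      rw [PySem.Chars.splitOn.go]
      simp only [List.length_cons] at h
      by_cases hp : ([','] : List Char).isPrefixOf (c :: t)
      · have hc : c = ',' := by simp [List.isPrefixOf] at hp; exact hp.symm
        simp only [hp, if_true, List.length_cons, List.length_nil]
        show PySem.Chars.splitOn.go _ n ((c :: t).drop 1) _ _ = _
        simp only [List.drop_one, List.tail_cons]
        rw [ih t [] (cur.reverse :: acc) (by omega)]
        simp only [pvSplitC, hc, if_true, List.reverse_cons, List.reverse_nil, List.modifyHead,
          List.nil_append, List.append_assoc]
        cases pvSplitC t <;> simp [List.modifyHead]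
      · have hc : ¬ c = ',' := by simp [List.isPrefixOf] at hp; simpa [eq_comm] using hp
        simp only [hp, if_false]
        rw [ih t (c :: cur) acc (by omega)]
        simp only [pvSplitC, hc, if_false]
        cases hsp : pvSplitC t with
        | nil => simp
        | cons x xs => simp [List.modifyHead]

theorem pvSplitOnComma (s : List Char) :
    PySem.Chars.splitOn s [','] = pvSplitC s := by
  rw [PySem.Chars.splitOn]
  rw [pvGoSplit (s.length + 1) s [] [] (by omega)]
  cases h : pvSplitC s with
  | nil => simp
  | cons x xs => simp [List.modifyHead]

-- the six single-char replaces compose into pvF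
theorem pvSixMaps (c : Char) :
    (fun c => if c = '•' then ',' else c)
      ((fun c => if c = '|' then ',' else c)
        ((fun c => if c = ';' then ',' else c)
          ((fun c => if c = '+' then ',' else c)
            ((fun c => if c = '/' then ',' else c)
              ((fun c => if c = '&' then ',' else c) c))))) = pvF c := by
  simp only [pvF, pvDelims]
  by_cases h1 : c = '&' <;> by_cases h2 : c = '/' <;> by_cases h3 : c = '+' <;>
    by_cases h4 : c = ';' <;> by_cases h5 : c = '|' <;> by_cases h6 : c = '•' <;>
    by_cases h7 : c = ',' <;> simp_all

theorem pvTokens_ne_nil (l : List Char) : pvTokens l ≠ [] := by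
  induction l using pvTokens.induct with
  | case1 => simp [pvTokens]
  | case2 c t hp ih => rw [pvTokens]; simp [hp]
  | case3 c t hp hd ih => rw [pvTokens]; simp [hp, hd]
  | case4 c t hp hd heq => rw [pvTokens]; simp [hp, hd, heq]
  | case5 c t hp hd x xs heq ih => rw [pvTokens]; simp [hp, hd, heq]

-- core: split-on-comma of A's normalised string = B's one-pass tokenizer
theorem pvFused (s : List Char) :
    pvSplitC ((pvReplAnd s).map pvF) = pvTokens s := by
  induction s using pvTokens.induct with
  | case1 => simp [pvReplAnd, pvSplitC, pvTokens]
  | case2 c t hp ih =>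
    rw [pvReplAnd, pvTokens]
    have h1 : pvF ',' = ',' := by decide
    simp [hp, h1, pvSplitC, ih]
  | case3 c t hp hd ih =>
    rw [pvReplAnd, pvTokens]
    have h1 : pvF c = ',' := by simp [pvF, hd]
    simp [hp, hd, h1, pvSplitC, ih]
  | case4 c t hp hd heq =>
    exact absurd heq (pvTokens_ne_nil t)
  | case5 c t hp hd x xs heq ih =>
    rw [pvReplAnd, pvTokens]
    have hFc : pvF c = c := by simp [pvF, hd]
    have hcc : ¬ c = ',' := by
      intro h; exact hd (by rw [h]; simp [pvDelims])
    simp [hp, hd, hFc, hcc, pvSplitC, heq, ih ,List.modifyHead]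

-- B's strip-filter-dedup loop equals A's dedup loop over the pre-stripped, pre-filtered parts
theorem pvLoops (toks : List (List Char)) : ∀ (seen : PySem.Set (List Char)) (out : List (List Char)),
    pvDedupB toks seen out
      = pvDedupA ((toks.filter (fun p => !(PySem.Chars.strip p).isEmpty)).map PySem.Chars.strip) seen out := by
  induction toks with
  | nil => intro seen out; simp [pvDedupA, pvDedupB]
  | cons tok rest ih =>
    intro seen out
    rw [pvDedupB]
    by_cases hne : PySem.Chars.strip tok = []
    · simp only [hne, List.filter_cons, List.isEmpty_nil, Bool.not_true]
      simp only [ne_eq, not_true_eq_false, false_and, if_false]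
      rw [ih]
      simp [hne]
    · simp only [List.filter_cons]
      have : (!(PySem.Chars.strip tok).isEmpty) = true := by
        simp [hne]
      rw [this]
      simp only [if_true, List.map_cons, pvDedupA]
      by_cases hc : PySem.Set.contains seen (PySem.Chars.lower (PySem.Chars.strip tok))
      · simp only [hne, hc, ne_eq, not_false_eq_true, true_and, not_true_eq_false, if_false,
          if_true]
        exact ih seen out
      · simp only [hne, hc, ne_eq, not_false_eq_true, true_and]
        exact ih _ _

-- ===== VERDICT (by name: the statement is the Claim_ definition above) =====
theorem pvMapsFuse (l : List Char) :
    (((((l.map (fun c => if c = '&' then ',' else c)).map (fun c => if c = '/' then ',' else c)).map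
       (fun c => if c = '+' then ',' else c)).map (fun c => if c = ';' then ',' else c)).map
       (fun c => if c = '|' then ',' else c)).map (fun c => if c = '\u2022' then ',' else c) = l.map pvF := by
  induction l with
  | nil => rfl
  | cons c t ih =>
    simp only [List.map_cons, ih, List.cons.injEq, and_true]
    exact pvSixMaps c

theorem pvChain (s : List Char) :
    [" and ", ",", "&", "/", "+", ";", "|", "\u2022"].foldl
      (fun acc pat => PySem.Chars.replace acc pat.toList [',']) s = (pvReplAnd s).map pvF := by
  simp only [List.foldl]
  rw [show (",".toList) = [','] from rfl,
      show ("&".toList) = ['&'] from rfl, show ("/".toList) = ['/'] from rfl,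
      show ("+".toList) = ['+'] from rfl, show (";".toList) = [';'] from rfl,
      show ("|".toList) = ['|'] from rfl, show ("\u2022".toList) = ['\u2022'] from rfl]
  rw [pvReplaceAnd]
  simp only [pvReplaceChar]
  rw [pvMapComma]
  exact pvMapsFuse (pvReplAnd s)

theorem split_players_py_spec : Claim_equal_split_players_py := by
  intro players_str _
  unfold Spec_split_players_py split_players_py split_players_py_alt
  by_cases h : PySem.Chars.strip players_str.toList = []
  · simp [h]
  · simp only [h, if_false]
    rw [pvChain, pvSplitOnComma, pvFused, pvLoops]
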